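-- pv_equiv track=rewrite | github.com/S-Gildas/Arithmetic | bezout_relation_exo_4.py | list_abqr
-- ===== SOURCE A (Python) =====
-- def list_abqr(a,b):
--
--     """ This function gives a list of tuple , each tuple containing the value
--            of a,b,q,r (q is the quotient, and r the remainder) ,
--            from the last division to the first one. """
--
--     r, q = a%b ,a//b # the remainder and the quotient of the division of a by b
--
--     abrq_list=[] # abr_list will be the liste of tuple (a,b,q,r) for each divison
--
--     while True :
--         r, q = a%b ,a//b # and q, r
--         abrq_list.append((a,b,q,r)) #add at the end of the list the triplet (a,b,r)
--         a, b = b, r      # new values of a, b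
--         if r == 0:
--             break
--     abrq_list.reverse()
--
--     return abrq_list
-- ===== SOURCE B (Python) =====
-- def list_abqr(a, b):
--     """Same result as A, as a recursion over the Euclidean steps: the recursive
--     call's list (earlier divisions, already last-first) followed by the current
--     step, so no explicit list-and-reverse is needed."""
--     r, q = a % b, a // b
--     current = (a, b, q, r)
--     if r == 0:
--         return [current]
--     return list_abqr(b, r) + [current]
-- ===== Notes on version B (the rewrite author's own statement) =====
-- stated objective: simpler
-- what changed: Replaces the while-True loop with append-and-reverse by a direct recursion over the Euclidean steps that builds the reversed list by appending the current step after the recursive result.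
import Mathlib
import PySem

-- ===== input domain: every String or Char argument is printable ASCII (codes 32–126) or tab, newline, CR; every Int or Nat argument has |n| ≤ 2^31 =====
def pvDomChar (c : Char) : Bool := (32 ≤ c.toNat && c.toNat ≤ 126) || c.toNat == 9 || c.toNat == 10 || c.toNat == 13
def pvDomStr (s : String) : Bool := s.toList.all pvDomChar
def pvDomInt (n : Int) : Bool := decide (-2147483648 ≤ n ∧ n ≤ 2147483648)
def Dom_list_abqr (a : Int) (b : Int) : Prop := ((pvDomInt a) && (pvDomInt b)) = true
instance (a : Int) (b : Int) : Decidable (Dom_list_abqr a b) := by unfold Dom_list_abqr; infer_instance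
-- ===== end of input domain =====

-- B replaces A's while-loop with append-and-reverse by a direct recursion over the
-- Euclidean steps that emits the reversed order as it returns (objective: simpler).


-- Termination measure fact both recursions use: the remainder shrinks in absolute value.
theorem pvModNatAbsLt (a b : Int) (hb : b ≠ 0) :
    (PySem.Int.mod a b).natAbs < b.natAbs := by
  rcases lt_or_gt_of_ne hb with h | h
  · have := PySem.Int.mod_neg_bounds a h
    omega
  · have h1 := PySem.Int.mod_nonneg a h
    have h2 := PySem.Int.mod_lt a h
    omega

-- ===== PORT A =====
-- A's while-True loop with an accumulator, then reverse; the 'b = 0' guard marks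
-- where Python raises ZeroDivisionError (excluded by Pre_).
def list_abqr_loop (a b : Int) (acc : List (Int × Int × Int × Int)) :
    List (Int × Int × Int × Int) :=
  if hb : b = 0 then acc.reverse  -- Python raises here; outside Pre_
  else
    let r := PySem.Int.mod a b
    let q := PySem.Int.floordiv a b
    let acc' := acc ++ [(a, b, q, r)]
    if hr : r = 0 then acc'.reverse
    else list_abqr_loop b r acc'
termination_by b.natAbs
decreasing_by exact pvModNatAbsLt a b hb

def list_abqr (a : Int) (b : Int) : List (Int × Int × Int × Int) :=
  -- 'r, q = a%b, a//b' before the loop: values discarded; only its b=0 raise matters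
  list_abqr_loop a b []

-- ===== PORT B =====
def list_abqr_alt (a : Int) (b : Int) : List (Int × Int × Int × Int) :=
  if hb : b = 0 then []  -- Python raises here; outside Pre_
  else
    let r := PySem.Int.mod a b
    let q := PySem.Int.floordiv a b
    if hr : r = 0 then [(a, b, q, r)]
    else list_abqr_alt b r ++ [(a, b, q, r)]
termination_by b.natAbs
decreasing_by exact pvModNatAbsLt a b hb

-- ===== PRECONDITION & SPEC =====
-- Python raises ZeroDivisionError (in both A and B) exactly when b == 0.
def Pre_list_abqr (a : Int) (b : Int) : Prop := b ≠ 0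
instance (a : Int) (b : Int) : Decidable (Pre_list_abqr a b) := by unfold Pre_list_abqr; infer_instance
def pvWitness_list_abqr : Int × Int := (240, 46)

def Spec_list_abqr (a : Int) (b : Int) (out : List (Int × Int × Int × Int)) : Prop := out = list_abqr_alt a b
instance (a : Int) (b : Int) (out : List (Int × Int × Int × Int)) : Decidable (Spec_list_abqr a b out) := by unfold Spec_list_abqr; infer_instance

-- ===== CLAIM (what is proved, stated in full; the proofs are below) =====
def Claim_equal_list_abqr : Prop := ∀ (a : Int) (b : Int), Dom_list_abqr a b → Pre_list_abqr a b → Spec_list_abqr a b (list_abqr a b)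

-- ===== LEMMAS AND PROOFS =====
theorem loop_eq_alt (n : Nat) (a b : Int) (hn : b.natAbs ≤ n) (hb : b ≠ 0)
    (acc : List (Int × Int × Int × Int)) :
    list_abqr_loop a b acc = list_abqr_alt a b ++ acc.reverse := by
  induction n generalizing a b acc with
  | zero => omega
  | succ n ih =>
    rw [list_abqr_loop, list_abqr_alt]
    simp only [hb, dite_false]
    by_cases hr : PySem.Int.mod a b = 0
    · simp [hr]
    · have hlt := pvModNatAbsLt a b hb
      rw [dif_neg hr, dif_neg hr, ih b _ (by omega) hr]
      simp

-- ===== VERDICT (by name: the statement is the Claim_ definition above) =====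
theorem list_abqr_spec : Claim_equal_list_abqr := by
  intro a b _ hb
  show list_abqr a b = list_abqr_alt a b
  rw [list_abqr, loop_eq_alt b.natAbs a b le_rfl hb]
  simp
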